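-- pv_equiv track=rewrite | github.com/Levardoo/universidad | TD/practica2/ej3.py | es_dcpo
-- ===== SOURCE A (Python) =====
-- import itertools
--
-- def es_dirigido(conjunto, relacion, D):
--     # Implement the logic to check if D is directed
--     for x in D:
--         for y in D:
--             if x != y:
--                 if not any((x, z) in relacion and (y, z) in relacion for z in conjunto):
--                     return False
--     return True
--
-- def es_supremo(conjunto, relacion, z, D):
--     # Implement the logic to check if z is a supremum for D
--     for x in D:
--         if not (x == z or (x, z) in relacion):
--             return False
--     return True
--
-- def es_dcpo(conjunto, relacion):
--     # Generate all possible subsets of P and check if they are directed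
--     for r in range(1, len(conjunto)+1):
--         subconjuntos = itertools.combinations(conjunto, r)
--         for D in subconjuntos:
--             if es_dirigido(conjunto, relacion, D):
--                 # Check if there is a supremum
--                 supremo_encontrado = False
--                 for z in conjunto:
--                     if es_supremo(conjunto, relacion, z, D):
--                         supremo_encontrado = True
--                         break
--                 if not supremo_encontrado:
--                     return False
--     return True
-- ===== SOURCE B (Python) =====
-- def es_dcpo(conjunto, relacion):
--     rel = set(relacion)
--     up = {x: {z for z in conjunto if (x, z) in rel} for x in conjunto}
--     refl = {x: {z for z in conjunto if x == z or (x, z) in rel} for x in conjunto}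
--     n = len(conjunto)
--
--     # Depth-first backtracking over directed subsets only: directedness is a
--     # pairwise property, so every directed subset is reachable by extending a
--     # smaller directed subset; non-directed branches are pruned outright and
--     # the set of candidate upper bounds is intersected incrementally.
--     def extend(i, D, common):
--         for j in range(i, n):
--             x = conjunto[j]
--             if all(x == y or (up[x] & up[y]) for y in D):
--                 c2 = common & refl[x]
--                 if not c2:
--                     return False
--                 if not extend(j + 1, D + [x], c2):
--                     return False
--         return True
--
--     return extend(0, [], set(conjunto))
-- ===== Notes on version B (the rewrite author's own statement) =====
-- stated objective: faster
-- what changed: B replaces the flat enumeration of all subsets (combinations by size, each re-tested from scratch with nested scans) by a depth-first backtracking search that only ever extends already-directed subsets, pruning every non-directed branch, and carries the intersection of candidate upper bounds incrementally down the recursion instead of scanning all z for each subset.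
import Mathlib
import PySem

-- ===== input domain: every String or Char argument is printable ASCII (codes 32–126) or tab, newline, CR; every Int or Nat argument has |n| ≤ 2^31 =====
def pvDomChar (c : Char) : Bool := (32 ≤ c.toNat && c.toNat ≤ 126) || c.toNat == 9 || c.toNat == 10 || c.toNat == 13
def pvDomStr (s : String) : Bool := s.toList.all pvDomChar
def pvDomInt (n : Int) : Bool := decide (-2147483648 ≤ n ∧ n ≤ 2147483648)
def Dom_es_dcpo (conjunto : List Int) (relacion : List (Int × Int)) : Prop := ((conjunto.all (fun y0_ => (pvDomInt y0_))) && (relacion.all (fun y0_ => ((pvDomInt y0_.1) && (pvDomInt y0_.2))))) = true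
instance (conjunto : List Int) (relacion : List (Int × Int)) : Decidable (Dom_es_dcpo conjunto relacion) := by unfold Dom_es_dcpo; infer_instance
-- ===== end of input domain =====

-- B replaces the flat enumeration of all subsets by a depth-first backtracking search that
-- only extends already-directed subsets and carries the candidate-upper-bound intersection
-- incrementally (objective: faster — non-directed branches are pruned, per-subset rescans disappear).

-- ===== PORT A =====
def pvEsDirigido (conjunto : List Int) (relacion : List (Int × Int)) (D : List Int) : Bool :=
  D.all fun x => D.all fun y =>
    if x ≠ y then conjunto.any (fun z => relacion.contains (x, z) && relacion.contains (y, z))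
    else true

def pvEsSupremo (_conjunto : List Int) (relacion : List (Int × Int)) (z : Int) (D : List Int) : Bool :=
  D.all fun x => x == z || relacion.contains (x, z)

-- itertools.combinations(conjunto, r) is ported as List.sublistsLen r conjunto (the same
-- collection of index-subsequences; only a Bool is folded over them, so their order is irrelevant to the result).
def es_dcpo (conjunto : List Int) (relacion : List (Int × Int)) : Bool :=
  (PySem.List.pyRange 1 ((conjunto.length : Int) + 1) 1).all fun r =>
    (List.sublistsLen r.toNat conjunto).all fun D =>
      if pvEsDirigido conjunto relacion D then
        conjunto.any (fun z => pvEsSupremo conjunto relacion z D)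
      else true

-- ===== PORT B =====
-- {x: {z for z in conjunto if (x, z) in rel} for x in conjunto} (a dict comprehension is an insert loop)
def pvStrictDict (conjunto : List Int) (rel : PySem.Set (Int × Int)) : PySem.Dict Int (PySem.Set Int) :=
  conjunto.foldl (fun d x => PySem.Dict.insert d x
    (PySem.Set.ofList (conjunto.filter fun z => PySem.Set.contains rel (x, z)))) PySem.Dict.empty

-- {x: {z for z in conjunto if x == z or (x, z) in rel} for x in conjunto}
def pvReflDict (conjunto : List Int) (rel : PySem.Set (Int × Int)) : PySem.Dict Int (PySem.Set Int) :=
  conjunto.foldl (fun d x => PySem.Dict.insert d x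
    (PySem.Set.ofList (conjunto.filter fun z => x == z || PySem.Set.contains rel (x, z)))) PySem.Dict.empty

-- def extend(i, D, common): iterating j over range(i, n) with x = conjunto[j] is iterating
-- the list suffix conjunto[i:], so the recursion is structural on that suffix; the two early
-- 'return False' and the continuing loop become the && chain below.
-- dict subscripts up[...]/refl[...] are ported as getD with an irrelevant default: every key
-- looked up is an element of conjunto, and all of conjunto's elements are keys (no KeyError).
def pvExtend (up refl : PySem.Dict Int (PySem.Set Int)) :
    List Int → List Int → PySem.Set Int → Bool
  | [], _, _ => true
  | x :: rest, D, common =>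
    if D.all (fun y => x == y ||
        !(PySem.Set.inter (PySem.Dict.getD up x PySem.Set.empty)
            (PySem.Dict.getD up y PySem.Set.empty)).isEmpty) then
      let c2 := PySem.Set.inter common (PySem.Dict.getD refl x PySem.Set.empty)
      if c2.isEmpty then false
      else pvExtend up refl rest (D ++ [x]) c2 && pvExtend up refl rest D common
    else pvExtend up refl rest D common

def es_dcpo_alt (conjunto : List Int) (relacion : List (Int × Int)) : Bool :=
  let rel := PySem.Set.ofList relacion
  let up := pvStrictDict conjunto rel
  let refl := pvReflDict conjunto rel
  pvExtend up refl conjunto [] (PySem.Set.ofList conjunto)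

-- ===== PRECONDITION & SPEC =====
def Spec_es_dcpo (conjunto : List Int) (relacion : List (Int × Int)) (out : Bool) : Prop := out = es_dcpo_alt conjunto relacion
instance (conjunto : List Int) (relacion : List (Int × Int)) (out : Bool) : Decidable (Spec_es_dcpo conjunto relacion out) := by unfold Spec_es_dcpo; infer_instance

-- ===== CLAIM =====
def Claim_equal_es_dcpo : Prop := ∀ (conjunto : List Int) (relacion : List (Int × Int)), Dom_es_dcpo conjunto relacion → Spec_es_dcpo conjunto relacion (es_dcpo conjunto relacion)

-- ===== LEMMAS AND PROOFS =====

-- "L is directed": every two distinct members have a common strict upper bound in c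
def pvDir (c : List Int) (r : List (Int × Int)) (L : List Int) : Prop :=
  ∀ x ∈ L, ∀ y ∈ L, x ≠ y → ∃ z ∈ c, (x, z) ∈ r ∧ (y, z) ∈ r

-- "L has an upper bound in c" (reflexive)
def pvUB (c : List Int) (r : List (Int × Int)) (L : List Int) : Prop :=
  ∃ z ∈ c, ∀ x ∈ L, x = z ∨ (x, z) ∈ r

def pvGood (c : List Int) (r : List (Int × Int)) (D : List Int) : Prop :=
  pvDir c r D → pvUB c r D

-- the value pvStrictDict/pvReflDict store under each key
def pvStrictUB (conjunto : List Int) (rel : PySem.Set (Int × Int)) (x : Int) : PySem.Set Int :=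
  PySem.Set.ofList (conjunto.filter fun z => PySem.Set.contains rel (x, z))

def pvReflUB (conjunto : List Int) (rel : PySem.Set (Int × Int)) (x : Int) : PySem.Set Int :=
  PySem.Set.ofList (conjunto.filter fun z => x == z || PySem.Set.contains rel (x, z))

theorem pvGetD_foldl_insert {ν : Type} (f : Int → ν) (c : List Int) (d0 : PySem.Dict Int ν)
    (x : Int) (dflt : ν) (h : x ∈ c ∨ PySem.Dict.getD d0 x dflt = f x) :
    PySem.Dict.getD (c.foldl (fun d z => PySem.Dict.insert d z (f z)) d0) x dflt = f x := by
  induction c generalizing d0 with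
  | nil => simpa using h
  | cons a c ih =>
    apply ih
    by_cases hxc : x ∈ c
    · exact Or.inl hxc
    · right
      by_cases hxa : x = a
      · rw [hxa, PySem.Dict.getD_insert_self]
      · rw [PySem.Dict.getD_insert_of_ne _ _ _ hxa]
        rcases h with h | h
        · rcases List.mem_cons.mp h with h' | h' <;> [exact absurd h' hxa; exact absurd h' hxc]
        · exact h

theorem pvStrictDict_getD (c : List Int) (rel : PySem.Set (Int × Int)) (x : Int) (hx : x ∈ c) :
    PySem.Dict.getD (pvStrictDict c rel) x PySem.Set.empty = pvStrictUB c rel x := by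
  unfold pvStrictDict
  exact pvGetD_foldl_insert _ c _ x _ (Or.inl hx)

theorem pvReflDict_getD (c : List Int) (rel : PySem.Set (Int × Int)) (x : Int) (hx : x ∈ c) :
    PySem.Dict.getD (pvReflDict c rel) x PySem.Set.empty = pvReflUB c rel x := by
  unfold pvReflDict
  exact pvGetD_foldl_insert _ c _ x _ (Or.inl hx)

theorem pvMem_strictUB (c : List Int) (r : List (Int × Int)) (x w : Int) :
    w ∈ pvStrictUB c (PySem.Set.ofList r) x ↔ w ∈ c ∧ (x, w) ∈ r := by
  simp [pvStrictUB, PySem.Set.mem_ofList, List.mem_filter]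

theorem pvMem_reflUB (c : List Int) (r : List (Int × Int)) (x w : Int) :
    w ∈ pvReflUB c (PySem.Set.ofList r) x ↔ w ∈ c ∧ (x = w ∨ (x, w) ∈ r) := by
  simp [pvReflUB, PySem.Set.mem_ofList, List.mem_filter]

theorem pvNonempty_iff (s : List Int) : (s.isEmpty = false) ↔ ∃ w, w ∈ s := by
  cases s <;> simp

-- A-side characterisation -----------------------------------------------------

theorem pvDirigido_iff (c : List Int) (r : List (Int × Int)) (D : List Int) :
    pvEsDirigido c r D = true ↔ pvDir c r D := by
  simp only [pvEsDirigido, pvDir, List.all_eq_true]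
  constructor
  · intro h x hx y hy hne
    have := h x hx y hy
    rw [if_pos hne] at this
    simpa using this
  · intro h x hx y hy
    by_cases hne : x = y
    · simp [hne]
    · rw [if_pos hne]
      simpa using h x hx y hy hne

theorem pvSup_iff (c : List Int) (r : List (Int × Int)) (D : List Int) :
    (c.any fun z => pvEsSupremo c r z D) = true ↔ pvUB c r D := by
  simp [pvEsSupremo, pvUB, List.any_eq_true, List.all_eq_true]

theorem pvA_iff (c : List Int) (r : List (Int × Int)) :
    es_dcpo c r = true ↔ ∀ D : List Int, D.Sublist c → D ≠ [] → pvGood c r D := by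
  unfold es_dcpo
  rw [List.all_eq_true]
  constructor
  · intro h D hsub hne
    have h1 : (1 : Int) ≤ (D.length : Int) := by
      have : 0 < D.length := List.length_pos_of_ne_nil hne
      omega
    have h2 : (D.length : Int) < (c.length : Int) + 1 := by
      have := hsub.length_le; omega
    have hmem : (D.length : Int) ∈ PySem.List.pyRange 1 ((c.length : Int) + 1) 1 :=
      (PySem.List.mem_pyRange_one).mpr ⟨h1, h2⟩
    have hD : D ∈ List.sublistsLen ((D.length : Int)).toNat c := by
      rw [Int.toNat_natCast]
      exact (List.mem_sublistsLen).mpr ⟨hsub, rfl⟩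
    have := h _ hmem
    rw [List.all_eq_true] at this
    have := this D hD
    intro hdir
    by_cases hd : pvEsDirigido c r D = true
    · rw [if_pos hd] at this
      exact (pvSup_iff c r D).mp this
    · exact absurd ((pvDirigido_iff c r D).mpr hdir) hd
  · intro h rr hrr
    rw [List.all_eq_true]
    intro D hD
    obtain ⟨hsub, hlen⟩ := (List.mem_sublistsLen).mp hD
    obtain ⟨h1, h2⟩ := (PySem.List.mem_pyRange_one).mp hrr
    have hne : D ≠ [] := by
      intro hnil
      rw [hnil] at hlen
      simp at hlen
      omega
    by_cases hd : pvEsDirigido c r D = true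
    · rw [if_pos hd]
      exact (pvSup_iff c r D).mpr (h D hsub hne ((pvDirigido_iff c r D).mp hd))
    · rw [if_neg hd]

-- B-side characterisation -----------------------------------------------------

theorem pvDir_mono (c : List Int) (r : List (Int × Int)) (L L' : List Int)
    (hsub : ∀ a ∈ L', a ∈ L) (h : pvDir c r L) : pvDir c r L' :=
  fun x hx y hy hne => h x (hsub x hx) y (hsub y hy) hne

-- the directedness test B runs before adding x: equivalent to "D ++ [x] is directed" when D already is
theorem pvCompat_iff (c : List Int) (r : List (Int × Int)) (D : List Int) (x : Int)
    (hx : x ∈ c) (hDc : ∀ y ∈ D, y ∈ c) (hDir : pvDir c r D) :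
    (D.all fun y => x == y ||
        !(PySem.Set.inter (PySem.Dict.getD (pvStrictDict c (PySem.Set.ofList r)) x PySem.Set.empty)
            (PySem.Dict.getD (pvStrictDict c (PySem.Set.ofList r)) y PySem.Set.empty)).isEmpty) = true
      ↔ pvDir c r (D ++ [x]) := by
  rw [List.all_eq_true]
  constructor
  · intro h a ha b hb hne
    rw [List.mem_append, List.mem_singleton] at ha hb
    rcases ha with ha | ha <;> rcases hb with hb | hb
    · exact hDir a ha b hb hne
    · subst hb
      have := h a ha
      rw [pvStrictDict_getD c _ _ hx, pvStrictDict_getD c _ _ (hDc a ha),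
        Bool.or_eq_true, beq_iff_eq, Bool.not_eq_true', pvNonempty_iff] at this
      rcases this with he | ⟨w, hw⟩
      · exact absurd he.symm hne
      · rw [PySem.Set.mem_inter, pvMem_strictUB, pvMem_strictUB] at hw
        exact ⟨w, hw.1.1, hw.2.2, hw.1.2⟩
    · subst ha
      have := h b hb
      rw [pvStrictDict_getD c _ _ hx, pvStrictDict_getD c _ _ (hDc b hb),
        Bool.or_eq_true, beq_iff_eq, Bool.not_eq_true', pvNonempty_iff] at this
      rcases this with he | ⟨w, hw⟩
      · exact absurd he hne
      · rw [PySem.Set.mem_inter, pvMem_strictUB, pvMem_strictUB] at hw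
        exact ⟨w, hw.1.1, hw.1.2, hw.2.2⟩
    · exact absurd (ha.trans hb.symm) hne
  · intro h y hy
    rw [pvStrictDict_getD c _ _ hx, pvStrictDict_getD c _ _ (hDc y hy),
      Bool.or_eq_true, beq_iff_eq, Bool.not_eq_true', pvNonempty_iff]
    by_cases hne : x = y
    · exact Or.inl hne
    · right
      obtain ⟨z, hz, h1, h2⟩ := h x (by simp) y (by simp [hy]) hne
      exact ⟨z, (PySem.Set.mem_inter _ _ _).mpr
        ⟨(pvMem_strictUB c r x z).mpr ⟨hz, h1⟩, (pvMem_strictUB c r y z).mpr ⟨hz, h2⟩⟩⟩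

-- the loop invariant: common is exactly the set of reflexive upper bounds of D inside c
def pvInv (c : List Int) (r : List (Int × Int)) (D : List Int) (common : PySem.Set Int) : Prop :=
  ∀ w, w ∈ common ↔ w ∈ c ∧ ∀ x ∈ D, x = w ∨ (x, w) ∈ r

theorem pvInv_step (c : List Int) (r : List (Int × Int)) (D : List Int) (common : PySem.Set Int)
    (x : Int) (hx : x ∈ c) (hinv : pvInv c r D common) :
    pvInv c r (D ++ [x])
      (PySem.Set.inter common (PySem.Dict.getD (pvReflDict c (PySem.Set.ofList r)) x PySem.Set.empty)) := by
  intro w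
  rw [PySem.Set.mem_inter, hinv w, pvReflDict_getD c _ _ hx, pvMem_reflUB]
  constructor
  · rintro ⟨⟨hwc, hall⟩, _, hxw⟩
    refine ⟨hwc, fun a ha => ?_⟩
    rw [List.mem_append, List.mem_singleton] at ha
    rcases ha with ha | ha
    · exact hall a ha
    · exact ha ▸ hxw
  · rintro ⟨hwc, hall⟩
    exact ⟨⟨hwc, fun a ha => hall a (by simp [ha])⟩, hwc, hall x (by simp)⟩

theorem pvInv_nonempty (c : List Int) (r : List (Int × Int)) (D : List Int)
    (common : PySem.Set Int) (hinv : pvInv c r D common) :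
    (common.isEmpty = false) ↔ pvUB c r D := by
  rw [pvNonempty_iff]
  constructor
  · rintro ⟨w, hw⟩
    obtain ⟨hwc, hall⟩ := (hinv w).mp hw
    exact ⟨w, hwc, hall⟩
  · rintro ⟨z, hz, hall⟩
    exact ⟨z, (hinv z).mpr ⟨hz, hall⟩⟩

-- the key lemma: what the DFS decides, given the invariant
theorem pvExtend_iff (c : List Int) (r : List (Int × Int)) :
    ∀ (suffix D : List Int) (common : PySem.Set Int),
    (∀ x ∈ suffix, x ∈ c) → (∀ x ∈ D, x ∈ c) → pvDir c r D → pvInv c r D common →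
    (pvExtend (pvStrictDict c (PySem.Set.ofList r)) (pvReflDict c (PySem.Set.ofList r))
        suffix D common = true
      ↔ ∀ E : List Int, E.Sublist suffix → E ≠ [] → pvDir c r (D ++ E) → pvUB c r (D ++ E)) := by
  intro suffix
  induction suffix with
  | nil =>
    intro D common _ _ _ _
    simp only [pvExtend, true_iff]
    intro E hE hne
    rw [List.sublist_nil.mp hE] at hne
    exact absurd rfl hne
  | cons x rest ih =>
    intro D common hsuf hDc hDir hinv
    have hx : x ∈ c := hsuf x (by simp)
    have hrest : ∀ a ∈ rest, a ∈ c := fun a ha => hsuf a (by simp [ha])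
    simp only [pvExtend]
    by_cases hcompat : (D.all fun y => x == y ||
        !(PySem.Set.inter (PySem.Dict.getD (pvStrictDict c (PySem.Set.ofList r)) x PySem.Set.empty)
            (PySem.Dict.getD (pvStrictDict c (PySem.Set.ofList r)) y PySem.Set.empty)).isEmpty) = true
    · rw [if_pos hcompat]
      have hDirx : pvDir c r (D ++ [x]) := (pvCompat_iff c r D x hx hDc hDir).mp hcompat
      have hDcx : ∀ a ∈ D ++ [x], a ∈ c := by
        intro a ha
        rw [List.mem_append, List.mem_singleton] at ha
        rcases ha with ha | ha
        · exact hDc a ha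
        · exact ha ▸ hx
      have hinv2 := pvInv_step c r D common x hx hinv
      by_cases hc2 : (PySem.Set.inter common
          (PySem.Dict.getD (pvReflDict c (PySem.Set.ofList r)) x PySem.Set.empty)).isEmpty = true
      · rw [if_pos hc2]
        constructor
        · intro h
          simp at h
        · intro h
          exfalso
          have hub := h [x] ((List.nil_sublist rest).cons₂ x) (by simp) hDirx
          rw [← pvInv_nonempty c r (D ++ [x]) _ hinv2] at hub
          rw [hub] at hc2
          exact absurd hc2 (by simp)
      · rw [if_neg hc2]
        rw [Bool.and_eq_true,
          ih (D ++ [x]) _ hrest hDcx hDirx hinv2,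
          ih D common hrest hDc hDir hinv]
        have hubx : pvUB c r (D ++ [x]) :=
          (pvInv_nonempty c r (D ++ [x]) _ hinv2).mp (by simpa using hc2)
        constructor
        · rintro ⟨h1, h2⟩ E hE hne hdir
          cases hE with
          | cons _ hE' => exact h2 E hE' hne hdir
          | cons₂ _ hE' =>
            rename_i E'
            rcases List.eq_nil_or_concat' E' with hnil | _
            · subst hnil; exact hubx
            · have : D ++ x :: E' = (D ++ [x]) ++ E' := by simp
              rw [this] at hdir ⊢
              exact h1 E' hE' (by rename_i h'; rcases h' with ⟨l, a, rfl⟩; simp) hdir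
        · intro h
          constructor
          · intro E' hE' hne hdir
            have heq : (D ++ [x]) ++ E' = D ++ x :: E' := by simp
            rw [heq] at hdir ⊢
            exact h (x :: E') (hE'.cons₂ x) (by simp) hdir
          · intro E hE hne hdir
            exact h E (hE.cons x) hne hdir
    · rw [if_neg hcompat]
      rw [ih D common hrest hDc hDir hinv]
      constructor
      · intro h E hE hne hdir
        cases hE with
        | cons _ hE' => exact h E hE' hne hdir
        | cons₂ _ hE' =>
          exfalso
          apply hcompat
          apply (pvCompat_iff c r D x hx hDc hDir).mpr
          refine pvDir_mono c r _ _ ?_ hdir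
          intro a ha
          rw [List.mem_append, List.mem_singleton] at ha
          rcases ha with ha | ha
          · exact List.mem_append_left _ ha
          · rw [ha]
            exact List.mem_append_right _ (by simp)
      · intro h E hE hne hdir
        exact h E (hE.cons x) hne hdir

theorem pvB_iff (c : List Int) (r : List (Int × Int)) :
    es_dcpo_alt c r = true ↔ ∀ D : List Int, D.Sublist c → D ≠ [] → pvGood c r D := by
  unfold es_dcpo_alt
  rw [pvExtend_iff c r c [] (PySem.Set.ofList c) (fun _ h => h) (by simp)
    (fun x hx => absurd hx (List.not_mem_nil))
    (fun w => by simp [PySem.Set.mem_ofList])]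
  unfold pvGood
  simp only [List.nil_append]

-- ===== VERDICT =====
theorem es_dcpo_spec : Claim_equal_es_dcpo := by
  intro c r _
  unfold Spec_es_dcpo
  by_cases h : es_dcpo c r = true
  · rw [h]
    exact ((pvB_iff c r).mpr ((pvA_iff c r).mp h)).symm
  · have h2 : es_dcpo c r = false := by simpa using h
    rw [h2]
    cases hb : es_dcpo_alt c r
    · rfl
    · exact absurd ((pvA_iff c r).mpr ((pvB_iff c r).mp hb)) h
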